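-- pv_equiv track=rewrite | github.com/nathikazad/ai-tracker | firmware/nrf/scripts/fletcherReceiveBleCam.py | calculate_fletcher32
-- ===== SOURCE A (Python) =====
-- def calculate_fletcher32(data):
--     sum1 = 0xffff
--     sum2 = 0xffff
--     length = len(data)
--     index = 0
--
--     while length > 0:
--         tlen = min(length, 359)
--         length -= tlen
--
--         for _ in range(tlen):
--             sum1 += data[index]
--             sum2 += sum1
--             index += 1
--
--         sum1 = (sum1 & 0xffff) + (sum1 >> 16)
--         sum2 = (sum2 & 0xffff) + (sum2 >> 16)
--
--     sum1 = (sum1 & 0xffff) + (sum1 >> 16)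
--     sum2 = (sum2 & 0xffff) + (sum2 >> 16)
--
--     return (sum2 << 16) | sum1
-- ===== SOURCE B (Python) =====
-- def calculate_fletcher32(data):
--     sum1 = 0xffff
--     sum2 = 0xffff
--
--     while data:
--         chunk = data[:359]
--         data = data[359:]
--         m = len(chunk)
--         sum2 += m * sum1 + sum(b * (m - k) for k, b in enumerate(chunk))
--         sum1 += sum(chunk)
--
--         sum1 = (sum1 & 0xffff) + (sum1 >> 16)
--         sum2 = (sum2 & 0xffff) + (sum2 >> 16)
--
--     sum1 = (sum1 & 0xffff) + (sum1 >> 16)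
--     sum2 = (sum2 & 0xffff) + (sum2 >> 16)
--
--     return (sum2 << 16) | sum1
-- ===== Notes on version B (the rewrite author's own statement) =====
-- stated objective: alternative
-- what changed: The inner per-byte accumulation loop is replaced by closed-form per-chunk increments (sum1 += sum(chunk); sum2 += m*sum1 + sum of b*(m-k)), keeping the 359-byte chunking and the identical fold points, so every fold sees the same exact integers.
import Mathlib
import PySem

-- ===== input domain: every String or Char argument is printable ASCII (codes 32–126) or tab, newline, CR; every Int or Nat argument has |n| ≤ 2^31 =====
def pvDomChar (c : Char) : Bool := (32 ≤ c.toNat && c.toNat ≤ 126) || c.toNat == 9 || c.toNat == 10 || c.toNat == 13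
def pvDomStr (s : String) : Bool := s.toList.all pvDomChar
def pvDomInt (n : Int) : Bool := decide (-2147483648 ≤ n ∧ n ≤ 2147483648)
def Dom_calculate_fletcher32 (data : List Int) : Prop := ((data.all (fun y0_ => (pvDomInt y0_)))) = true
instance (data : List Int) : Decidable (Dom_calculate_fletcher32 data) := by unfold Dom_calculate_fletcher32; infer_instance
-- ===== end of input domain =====

-- B replaces A's inner per-byte accumulation loop with closed-form per-chunk sums
-- (sum and an enumerate-weighted sum); the chunking and the fold points are unchanged
-- (alternative decomposition, same exact values at every fold point).

-- ===== PORT A =====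
-- (sum & 0xffff) + (sum >> 16), shared text of both Pythons
def pvFold16 (s : Int) : Int := PySem.Int.band s 0xffff + (s >>> (16 : Nat))

-- A's while loop: per chunk of 359, the per-byte inner loop, then the two folds
def pvLoopA (data : List Int) (s1 s2 : Int) : Int × Int :=
  if data = [] then (s1, s2)
  else
    let st := (data.take 359).foldl (fun (p : Int × Int) b => (p.1 + b, p.2 + p.1 + b)) (s1, s2)
    pvLoopA (data.drop 359) (pvFold16 st.1) (pvFold16 st.2)
termination_by data.length
decreasing_by
  rename_i h
  have : data.length ≠ 0 := fun hl => h (List.eq_nil_of_length_eq_zero hl)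
  simp [List.length_drop]; omega

def calculate_fletcher32 (data : List Int) : Int :=
  let st := pvLoopA data 0xffff 0xffff
  PySem.Int.bor (pvFold16 st.2 <<< (16 : Nat)) (pvFold16 st.1)

-- ===== PORT B =====
-- B's while loop: slice the chunk off, closed-form increments, same folds
def pvLoopB (data : List Int) (s1 s2 : Int) : Int × Int :=
  if data = [] then (s1, s2)
  else
    let chunk := PySem.List.slice data none (some 359)
    let rest := PySem.List.slice data (some 359) none
    let m : Int := chunk.length
    let s2' := s2 + m * s1 + ((PySem.List.enumerate chunk 0).map (fun kb => kb.2 * (m - kb.1))).sum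
    let s1' := s1 + chunk.sum
    pvLoopB rest (pvFold16 s1') (pvFold16 s2')
termination_by data.length
decreasing_by
  rename_i h
  have : data.length ≠ 0 := fun hl => h (List.eq_nil_of_length_eq_zero hl)
  rw [PySem.List.slice_from (xs := data) (a := (359:Int)) (by norm_num)]
  simp [List.length_drop]; omega

def calculate_fletcher32_alt (data : List Int) : Int :=
  let st := pvLoopB data 0xffff 0xffff
  PySem.Int.bor (pvFold16 st.2 <<< (16 : Nat)) (pvFold16 st.1)

-- ===== PRECONDITION & SPEC =====
def Spec_calculate_fletcher32 (data : List Int) (out : Int) : Prop := out = calculate_fletcher32_alt data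
instance (data : List Int) (out : Int) : Decidable (Spec_calculate_fletcher32 data out) := by unfold Spec_calculate_fletcher32; infer_instance

-- ===== CLAIM (what is proved, stated in full; the proofs are below) =====
def Claim_equal_calculate_fletcher32 : Prop := ∀ (data : List Int), Dom_calculate_fletcher32 data → Spec_calculate_fletcher32 data (calculate_fletcher32 data)

-- ===== LEMMAS AND PROOFS =====

-- the inner per-byte loop of A equals B's closed-form increments
lemma pvInner_closed (chunk : List Int) :
    ∀ (s1 s2 m s : Int), m - s = chunk.length →
    chunk.foldl (fun (p : Int × Int) b => (p.1 + b, p.2 + p.1 + b)) (s1, s2)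
      = (s1 + chunk.sum,
         s2 + (chunk.length : Int) * s1
            + ((PySem.List.enumerate chunk s).map (fun kb => kb.2 * (m - kb.1))).sum) := by
  induction chunk with
  | nil => intro s1 s2 m s h; simp [PySem.List.enumerate]
  | cons b rest ih =>
    intro s1 s2 m s h
    have h' : m - (s + 1) = rest.length := by
      simp at h ⊢; omega
    simp only [List.foldl_cons, PySem.List.enumerate_cons, List.map_cons, List.sum_cons,
      List.length_cons, List.sum_cons, ih (s1 + b) (s2 + s1 + b) m (s + 1) h']
    simp only [Prod.mk.injEq]
    refine ⟨by ring, ?_⟩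
    have hm : (rest.length : Int) = m - s - 1 := by push_cast at h'; omega
    push_cast
    rw [hm]; ring

lemma pvLoop_eq : ∀ (n : Nat) (data : List Int), data.length ≤ n →
    ∀ s1 s2, pvLoopB data s1 s2 = pvLoopA data s1 s2 := by
  intro n
  induction n with
  | zero =>
    intro data hlen s1 s2
    have : data = [] := List.eq_nil_of_length_eq_zero (Nat.le_zero.mp hlen)
    subst this
    rw [pvLoopA.eq_def, pvLoopB.eq_def]; simp
  | succ n ih =>
    intro data hlen s1 s2
    by_cases hd : data = []
    · subst hd; rw [pvLoopA.eq_def, pvLoopB.eq_def]; simp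
    · rw [pvLoopA.eq_def, pvLoopB.eq_def]
      simp only [hd, if_false]
      rw [PySem.List.slice_to (xs := data) (b := (359:Int)) (by norm_num), PySem.List.slice_from (xs := data) (a := (359:Int)) (by norm_num)]
      have hinner := pvInner_closed (data.take 359) s1 s2 ((data.take 359).length : Int) 0
        (by simp)
      rw [hinner]
      have hrest : (data.drop 359).length ≤ n := by
        have : data.length ≠ 0 := fun hl => hd (List.eq_nil_of_length_eq_zero hl)
        simp [List.length_drop]; omega
      norm_num
      exact ih _ hrest _ _

-- ===== VERDICT (by name: the statement is the Claim_ definition above) =====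
theorem calculate_fletcher32_spec : Claim_equal_calculate_fletcher32 := by
  intro data _
  show calculate_fletcher32 data = calculate_fletcher32_alt data
  unfold calculate_fletcher32 calculate_fletcher32_alt
  rw [pvLoop_eq data.length data le_rfl]
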